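-- pv_equiv track=rewrite | github.com/keep-me/ResearchOS | packages/agent/workspace/workspace_executor.py | _command_matches_allowlist
-- ===== SOURCE A (Python) =====
-- def _command_matches_allowlist(command: str, prefixes: list[str]) -> bool:
--     normalized_command = " ".join((command or "").strip().split()).lower()
--     if not normalized_command:
--         return False
--     for prefix in prefixes:
--         normalized_prefix = " ".join(prefix.strip().split()).lower()
--         if not normalized_prefix:
--             continue
--         if normalized_command == normalized_prefix or normalized_command.startswith(f"{normalized_prefix} "):
--             return True
--     return False
-- ===== SOURCE B (Python) =====
-- def _command_matches_allowlist(command: str, prefixes: list[str]) -> bool: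
--     tokens = (command or "").lower().split()
--     allowed = set()
--     for prefix in prefixes:
--         normalized = " ".join(prefix.lower().split())
--         if normalized:
--             allowed.add(normalized)
--     return any(" ".join(tokens[:i]) in allowed for i in range(1, len(tokens) + 1))
-- ===== Notes on version B (the rewrite author's own statement) =====
-- stated objective: alternative
-- what changed: Instead of scanning every allowlist prefix and testing equality/startswith against the normalized command string, B builds a set of the non-empty normalized prefixes once and probes each of the command's own leading-word joins ' '.join(tokens[:i]) for membership in that set.
import Mathlib
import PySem

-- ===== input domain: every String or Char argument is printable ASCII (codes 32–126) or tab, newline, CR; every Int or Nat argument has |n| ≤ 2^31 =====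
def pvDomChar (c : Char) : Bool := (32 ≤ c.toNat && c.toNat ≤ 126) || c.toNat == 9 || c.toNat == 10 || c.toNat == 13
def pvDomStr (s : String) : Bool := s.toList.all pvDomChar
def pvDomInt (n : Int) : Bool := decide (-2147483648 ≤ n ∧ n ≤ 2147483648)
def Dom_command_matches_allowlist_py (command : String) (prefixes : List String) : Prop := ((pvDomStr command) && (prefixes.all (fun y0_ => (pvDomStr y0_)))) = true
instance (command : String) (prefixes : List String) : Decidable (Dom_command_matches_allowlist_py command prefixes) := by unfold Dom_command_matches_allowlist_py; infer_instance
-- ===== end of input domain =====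

-- B probes the command's own leading-word joins against a set of normalized prefixes built once,
-- instead of scanning every allowlist prefix with startswith; same return value everywhere.

-- ===== PORT A =====
def command_matches_allowlist_py (command : String) (prefixes : List String) : Bool :=
  let normalized_command := PySem.Str.lower (PySem.Str.join " " (PySem.Str.split₀ (PySem.Str.strip (if command == "" then "" else command))))
  if normalized_command == "" then false
  else prefixes.any (fun pfx =>
    let normalized_prefix := PySem.Str.lower (PySem.Str.join " " (PySem.Str.split₀ (PySem.Str.strip pfx)))
    if normalized_prefix == "" then false
    else normalized_command == normalized_prefix || PySem.Str.startswith normalized_command (normalized_prefix ++ " "))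

-- ===== PORT B =====
def command_matches_allowlist_py_alt (command : String) (prefixes : List String) : Bool :=
  let tokens := PySem.Str.split₀ (PySem.Str.lower (if command == "" then "" else command))
  let allowed := prefixes.foldl (fun s pfx =>
      let normalized := PySem.Str.join " " (PySem.Str.split₀ (PySem.Str.lower pfx))
      if normalized == "" then s else PySem.Set.add s normalized) PySem.Set.empty
  (PySem.List.pyRange 1 (PySem.List.len tokens + 1) 1).any (fun i =>
      PySem.Set.contains allowed (PySem.Str.join " " (PySem.List.slice tokens none (some i))))

-- ===== PRECONDITION & SPEC =====
def Spec_command_matches_allowlist_py (command : String) (prefixes : List String) (out : Bool) : Prop := out = command_matches_allowlist_py_alt command prefixes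
instance (command : String) (prefixes : List String) (out : Bool) : Decidable (Spec_command_matches_allowlist_py command prefixes out) := by unfold Spec_command_matches_allowlist_py; infer_instance

-- ===== CLAIM (what is proved, stated in full; the proofs are below) =====
def Claim_equal_command_matches_allowlist_py : Prop := ∀ (command : String) (prefixes : List String), Dom_command_matches_allowlist_py command prefixes → Spec_command_matches_allowlist_py command prefixes (command_matches_allowlist_py command prefixes)

-- ===== LEMMAS AND PROOFS =====

-- tokens: every element is nonempty and whitespace-free
def pvGood (ts : List (List Char)) : Prop :=
  ∀ t ∈ ts, t ≠ [] ∧ ∀ c ∈ t, PySem.Chars.isspace c = false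

-- structural form of ' '.join on a token list
def pvJ : List (List Char) → List Char
  | [] => []
  | [a] => a
  | a :: b :: l => a ++ ' ' :: pvJ (b :: l)

-- structural form of str.split() (pvWords s cur = split₀.go s cur [])
def pvWords : List Char → List Char → List (List Char)
  | [], cur => if cur.isEmpty then [] else [cur.reverse]
  | c :: rest, cur =>
      if PySem.Chars.isspace c then
        (if cur.isEmpty then pvWords rest [] else cur.reverse :: pvWords rest [])
      else pvWords rest (c :: cur)

theorem pvJ_eq_join (l : List (List Char)) : PySem.Chars.join [' '] l = pvJ l := by
  induction l with
  | nil => rfl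
  | cons a l ih =>
    cases l with
    | nil => simp [PySem.Chars.join, List.intercalate, List.intersperse, pvJ]
    | cons b t =>
      simp only [PySem.Chars.join, List.intercalate, List.intersperse] at ih ⊢
      simp [pvJ, ← ih]

theorem pvGo_eq_words (s : List Char) : ∀ (cur : List Char) (acc : List (List Char)),
    PySem.Chars.split₀.go s cur acc = acc.reverse ++ pvWords s cur := by
  induction s with
  | nil => intro cur acc; simp [PySem.Chars.split₀.go, pvWords]; split <;> simp
  | cons c rest ih =>
    intro cur acc
    simp only [PySem.Chars.split₀.go, pvWords]
    split
    · split <;> simp [ih]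
    · exact ih _ _

theorem pvSplit₀_eq_words (s : List Char) : PySem.Chars.split₀ s = pvWords s [] := by
  simpa using pvGo_eq_words s [] []

theorem pvWords_good (s : List Char) : ∀ cur, (∀ c ∈ cur, PySem.Chars.isspace c = false) →
    pvGood (pvWords s cur) := by
  induction s with
  | nil =>
    intro cur h
    by_cases hc : cur = []
    · simp [pvWords, hc, pvGood]
    · intro t ht
      simp [pvWords, List.isEmpty_iff, hc] at ht
      subst ht
      constructor
      · simpa using hc
      · intro c hc'; exact h c (by simpa using hc')
  | cons c rest ih =>
    intro cur h
    simp only [pvWords]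
    split
    · rename_i hsp
      split
      · exact ih [] (by simp)
      · rename_i hc
        intro t ht
        rcases List.mem_cons.mp ht with rfl | ht
        · refine ⟨by simpa [List.isEmpty_iff] using hc, ?_⟩
          intro x hx; exact h x (by simpa using hx)
        · exact ih [] (by simp) t ht
    · rename_i hsp
      refine ih (c :: cur) ?_
      intro x hx
      rcases List.mem_cons.mp hx with rfl | hx
      · simpa using hsp
      · exact h x hx

theorem pvIsspace_lowerChar (c : Char) :
    PySem.Chars.isspace (PySem.Chars.lowerChar c) = PySem.Chars.isspace c := by
  unfold PySem.Chars.lowerChar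
  split
  · rename_i h
    simp only [PySem.Chars.isupper, Bool.and_eq_true, decide_eq_true_eq, Char.le_def] at h
    have h65 : 65 ≤ c.toNat := by exact_mod_cast h.1
    have h90 : c.toNat ≤ 90 := by exact_mod_cast h.2
    have hv : (c.toNat + 32).isValidChar := Or.inl (by omega)
    have ht : (Char.ofNat (c.toNat + 32)).toNat = c.toNat + 32 := by
      rw [Char.toNat_ofNat]; simp [hv]
    simp only [PySem.Chars.isspace, ht]
    have : (decide (c.toNat = 32) || decide (9 ≤ c.toNat) && decide (c.toNat ≤ 13) ||
        decide (28 ≤ c.toNat) && decide (c.toNat ≤ 31) || decide (c.toNat = 133) ||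
        decide (c.toNat = 160) || decide (c.toNat = 5760) ||
        decide (8192 ≤ c.toNat) && decide (c.toNat ≤ 8202) || decide (c.toNat = 8232) ||
        decide (c.toNat = 8233) || decide (c.toNat = 8239) || decide (c.toNat = 8287) ||
        decide (c.toNat = 12288)) = false := by
      simp only [Bool.or_eq_false_iff, Bool.and_eq_false_iff, decide_eq_false_iff_not]
      omega
    rw [this]
    simp only [Bool.or_eq_false_iff, Bool.and_eq_false_iff, decide_eq_false_iff_not]
    omega
  · rfl

theorem pvWords_lower (s : List Char) : ∀ cur,
    pvWords (PySem.Chars.lower s) (PySem.Chars.lower cur) = (pvWords s cur).map PySem.Chars.lower := by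
  induction s with
  | nil =>
    intro cur
    by_cases h : cur = [] <;>
      simp [pvWords, PySem.Chars.lower, h, List.isEmpty_iff, List.map_reverse]
  | cons c rest ih =>
    intro cur
    have h0 := ih []
    have h1 := ih (c :: cur)
    simp only [PySem.Chars.lower, List.map_nil, List.map_cons] at h0 h1 ⊢
    by_cases hsp : PySem.Chars.isspace c
    · by_cases hc : cur = [] <;>
        simp [pvWords, pvIsspace_lowerChar, hsp, hc, List.isEmpty_iff, List.map_reverse, h0,
          PySem.Chars.lower]
    · simpa [pvWords, pvIsspace_lowerChar, hsp, PySem.Chars.lower] using h1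

theorem pvWords_dropWhile (s : List Char) :
    pvWords (List.dropWhile PySem.Chars.isspace s) [] = pvWords s [] := by
  induction s with
  | nil => rfl
  | cons c rest ih =>
    by_cases h : PySem.Chars.isspace c
    · simpa [h, pvWords] using ih
    · simp [h]

theorem pvWords_append_spaces (t : List Char) (ht : ∀ c ∈ t, PySem.Chars.isspace c = true) :
    ∀ (s cur : List Char), pvWords (s ++ t) cur = pvWords s cur := by
  have hgen : ∀ t, (∀ c ∈ t, PySem.Chars.isspace c = true) → ∀ cur, pvWords t cur = pvWords [] cur := by
    intro t ht
    induction t with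
    | nil => intro cur; rfl
    | cons c r ih =>
      intro cur
      have hr := ih (fun x hx => ht x (List.mem_cons_of_mem _ hx)) []
      simp only [pvWords, ht c (by simp), if_true, List.isEmpty_nil] at hr ⊢
      split <;> simp [hr]
  intro s
  induction s with
  | nil => intro cur; exact hgen t ht cur
  | cons c r ih =>
    intro cur
    simp only [List.cons_append, pvWords]
    split
    · split <;> simp [ih]
    · exact ih _

theorem pvSplit₀_strip (s : List Char) :
    PySem.Chars.split₀ (PySem.Chars.strip s) = PySem.Chars.split₀ s := by
  rw [pvSplit₀_eq_words, pvSplit₀_eq_words]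
  unfold PySem.Chars.strip PySem.Chars.rstrip PySem.Chars.lstrip
  set u := List.dropWhile PySem.Chars.isspace s with hu
  have hdecomp : u = (List.dropWhile PySem.Chars.isspace u.reverse).reverse
      ++ (List.takeWhile PySem.Chars.isspace u.reverse).reverse := by
    rw [← List.reverse_append, List.takeWhile_append_dropWhile, List.reverse_reverse]
  have hsp : ∀ c ∈ (List.takeWhile PySem.Chars.isspace u.reverse).reverse,
      PySem.Chars.isspace c = true := by
    intro c hc
    exact List.mem_takeWhile_imp (List.mem_reverse.mp hc)
  calc pvWords (List.dropWhile PySem.Chars.isspace u.reverse).reverse []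
      = pvWords ((List.dropWhile PySem.Chars.isspace u.reverse).reverse
          ++ (List.takeWhile PySem.Chars.isspace u.reverse).reverse) [] :=
        (pvWords_append_spaces _ hsp _ _).symm
    _ = pvWords u [] := by rw [← hdecomp]
    _ = pvWords s [] := pvWords_dropWhile s

theorem pvLower_pvJ (l : List (List Char)) :
    PySem.Chars.lower (pvJ l) = pvJ (l.map PySem.Chars.lower) := by
  induction l with
  | nil => rfl
  | cons a l ih =>
    cases l with
    | nil => rfl
    | cons b t =>
      simp only [pvJ, List.map_cons, PySem.Chars.lower, List.map_append] at ih ⊢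
      simp [ih]
      rfl

theorem pvJ_eq_nil (ts : List (List Char)) (h : pvGood ts) : pvJ ts = [] ↔ ts = [] := by
  constructor
  · intro he
    cases ts with
    | nil => rfl
    | cons a l =>
      exfalso
      cases l with
      | nil => exact (h a (by simp)).1 he
      | cons b t => simp [pvJ] at he
  · rintro rfl; rfl

theorem pvGood_no_space {ts : List (List Char)} (h : pvGood ts) {t : List Char} (ht : t ∈ ts) :
    ∀ c ∈ t, c ≠ ' ' := by
  intro c hc he
  have := (h t ht).2 c hc
  subst he
  simp [PySem.Chars.isspace] at this

theorem pvSplitCat (a : List Char) : ∀ (b u v : List Char),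
    (∀ c ∈ a, c ≠ ' ') → (∀ c ∈ b, c ≠ ' ') →
    (u = [] ∨ ∃ u', u = ' ' :: u') → (v = [] ∨ ∃ v', v = ' ' :: v') →
    a ++ u = b ++ v → a = b ∧ u = v := by
  induction a with
  | nil =>
    intro b u v _ hb hu hv he
    cases b with
    | nil => simpa using he
    | cons d b' =>
      exfalso
      rcases hu with rfl | ⟨u', rfl⟩
      · simp at he
      · simp at he
        exact hb d (by simp) he.1.symm
  | cons c a' ih =>
    intro b u v ha hb hu hv he
    cases b with
    | nil =>
      exfalso
      rcases hv with rfl | ⟨v', rfl⟩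
      · simp at he
      · simp at he
        exact ha c (by simp) he.1
    | cons d b' =>
      simp only [List.cons_append, List.cons.injEq] at he
      obtain ⟨rfl, he2⟩ := he
      have := ih b' u v (fun x hx => ha x (by simp [hx])) (fun x hx => hb x (by simp [hx])) hu hv he2
      exact ⟨by simp [this.1], this.2⟩

theorem pvJ_cons (a : List Char) (l : List (List Char)) :
    pvJ (a :: l) = a ++ (if l = [] then [] else ' ' :: pvJ l) := by
  cases l <;> simp [pvJ]

theorem pvGood_cons {a : List Char} {l : List (List Char)} (h : pvGood (a :: l)) : pvGood l :=
  fun t ht => h t (List.mem_cons_of_mem _ ht)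

theorem pvJ_inj (as : List (List Char)) : ∀ bs, pvGood as → pvGood bs → pvJ as = pvJ bs → as = bs := by
  induction as with
  | nil =>
    intro bs _ hbs he
    exact ((pvJ_eq_nil bs hbs).mp (by simpa using he.symm)).symm
  | cons a as' ih =>
    intro bs has hbs he
    cases bs with
    | nil =>
      exact absurd ((pvJ_eq_nil _ has).mp (by simpa using he)) (by simp)
    | cons b bs' =>
      rw [pvJ_cons, pvJ_cons] at he
      have h1 := pvSplitCat a b _ _
        (pvGood_no_space has (by simp)) (pvGood_no_space hbs (by simp))
        (by split <;> simp) (by split <;> simp) he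
      obtain ⟨rfl, h2⟩ := h1
      by_cases ha' : as' = []
      · subst ha'
        by_cases hb' : bs' = []
        · simp [hb']
        · simp [hb'] at h2
      · by_cases hb' : bs' = []
        · simp [ha', hb'] at h2
        · simp only [if_neg ha', if_neg hb', List.cons.injEq] at h2
          have := ih bs' (pvGood_cons has) (pvGood_cons hbs) h2.2
          simp [this]

theorem pvJ_append_cons (ps : List (List Char)) (r : List Char) (rest : List (List Char)) :
    pvJ (ps ++ r :: rest) = (if ps = [] then [] else pvJ ps ++ [' ']) ++ pvJ (r :: rest) := by
  induction ps with
  | nil => simp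
  | cons q qs ihq =>
    rw [List.cons_append, pvJ_cons, pvJ_cons, ihq]
    by_cases hq : qs = [] <;> simp [hq]

theorem pvJ_prefix (ps : List (List Char)) : ∀ ts, pvGood ts → pvGood ps → ps ≠ [] →
    ((pvJ ps ++ [' ']) <+: pvJ ts ↔ ∃ rest, rest ≠ [] ∧ ts = ps ++ rest) := by
  induction ps with
  | nil => intro ts _ _ h; exact absurd rfl h
  | cons p ps' ih =>
    intro ts hts hps _
    constructor
    · intro hpre
      cases ts with
      | nil =>
        exfalso
        obtain ⟨ext, he⟩ := hpre
        rw [pvJ_cons] at he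
        cases p with
        | nil => exact (hps [] (by simp)).1 rfl
        | cons c p' => simp [pvJ] at he
      | cons t ts' =>
        obtain ⟨ext, he⟩ := hpre
        rw [pvJ_cons, pvJ_cons] at he
        have he' : p ++ ((if ps' = [] then ([] : List Char) else ' ' :: pvJ ps') ++ ' ' :: ext)
            = t ++ (if ts' = [] then ([] : List Char) else ' ' :: pvJ ts') := by
          simpa [List.append_assoc] using he
        have h1 := pvSplitCat p t
          ((if ps' = [] then ([] : List Char) else ' ' :: pvJ ps') ++ ' ' :: ext)
          (if ts' = [] then ([] : List Char) else ' ' :: pvJ ts')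
          (pvGood_no_space hps (by simp)) (pvGood_no_space hts (by simp))
          (by split <;> simp) (by split <;> simp) he'
        obtain ⟨rfl, h2⟩ := h1
        by_cases hp' : ps' = []
        · subst hp'
          simp only [ite_true, List.nil_append] at h2
          by_cases ht' : ts' = []
          · simp [ht'] at h2
          · exact ⟨ts', ht', by simp⟩
        · by_cases ht' : ts' = []
          · exfalso
            simp [ht', hp'] at h2
          · simp only [if_neg hp', if_neg ht', List.cons_append, List.cons.injEq, true_and] at h2
            have h3 : (pvJ ps' ++ [' ']) <+: pvJ ts' := ⟨ext, by simpa [List.append_assoc] using h2⟩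
            obtain ⟨rest, hr, rfl⟩ := (ih ts' (pvGood_cons hts) (pvGood_cons hps) hp').mp h3
            exact ⟨rest, hr, rfl⟩
    · rintro ⟨rest, hr, rfl⟩
      cases rest with
      | nil => exact absurd rfl hr
      | cons r rest' =>
        rw [pvJ_append_cons (p :: ps') r rest']
        exact ⟨pvJ (r :: rest'), by simp⟩

theorem pvMem_allowed (w : String → List Char) (l : List String) (x : String) :
    (x ∈ l.foldl (fun s p => if w p = [] then s
        else PySem.Set.add s (String.ofList (w p))) PySem.Set.empty) ↔
      ∃ p ∈ l, w p ≠ [] ∧ x = String.ofList (w p) := by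
  have hgen : ∀ (l : List String) (s : PySem.Set String),
      (x ∈ l.foldl (fun s p => if w p = [] then s
          else PySem.Set.add s (String.ofList (w p))) s) ↔
        x ∈ s ∨ ∃ p ∈ l, w p ≠ [] ∧ x = String.ofList (w p) := by
    intro l
    induction l with
    | nil => intro s; simp [PySem.Set]
    | cons p l ih =>
      intro s
      simp only [List.foldl_cons]
      by_cases h : w p = []
      · rw [if_pos h, ih]; simp [h]
      · rw [if_neg h, ih]
        simp [PySem.Set.mem_add, h]
        tauto
  rw [hgen]
  simp [PySem.Set.empty]

theorem pvNormA_eq (s : String) :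
    PySem.Str.lower (PySem.Str.join " " (PySem.Str.split₀ (PySem.Str.strip s)))
      = String.ofList (pvJ (pvWords (PySem.Chars.lower s.toList) [])) := by
  simp only [PySem.Str.lower, PySem.Str.join, PySem.Str.split₀, PySem.Str.strip,
    String.toList_ofList, List.map_map, Function.comp_def, List.map_id']
  rw [show (" " : String).toList = [' '] from rfl, pvSplit₀_strip, pvJ_eq_join, pvLower_pvJ,
    pvSplit₀_eq_words]
  have := pvWords_lower s.toList []
  simp only [PySem.Chars.lower, List.map_nil] at this ⊢
  rw [← this]

theorem pvNormB_eq (s : String) :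
    PySem.Str.join " " (PySem.Str.split₀ (PySem.Str.lower s))
      = String.ofList (pvJ (pvWords (PySem.Chars.lower s.toList) [])) := by
  simp only [PySem.Str.join, PySem.Str.split₀, PySem.Str.lower, String.toList_ofList,
    List.map_map, Function.comp_def, List.map_id']
  rw [show (" " : String).toList = [' '] from rfl, pvJ_eq_join, pvSplit₀_eq_words]

theorem pvGood_take (ts : List (List Char)) (h : pvGood ts) (n : Nat) : pvGood (ts.take n) :=
  fun t ht => h t (List.mem_of_mem_take ht)

theorem pvKey (ts ps : List (List Char)) (hts : pvGood ts) (hps : pvGood ps) (hne : ps ≠ []) :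
    (pvJ ts = pvJ ps ∨ (pvJ ps ++ [' ']) <+: pvJ ts) ↔
      ∃ i : Nat, 1 ≤ i ∧ i ≤ ts.length ∧ ts.take i = ps := by
  constructor
  · rintro (he | hpre)
    · have : ts = ps := pvJ_inj ts ps hts hps he
      subst this
      have h1 : 1 ≤ ts.length := by
        cases ts with
        | nil => exact absurd rfl hne
        | cons a l => simp
      exact ⟨ts.length, h1, le_refl _, List.take_length⟩
    · obtain ⟨rest, hr, rfl⟩ := (pvJ_prefix ps ts hts hps hne).mp hpre
      refine ⟨ps.length, ?_, ?_, ?_⟩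
      · cases ps with
        | nil => exact absurd rfl hne
        | cons a l => simp
      · simp
      · simp
  · rintro ⟨i, h1, h2, rfl⟩
    by_cases hi : i < ts.length
    · right
      rw [(pvJ_prefix _ ts hts (pvGood_take ts hts i) hne)]
      refine ⟨ts.drop i, ?_, (List.take_append_drop i ts).symm⟩
      intro hd
      have := List.length_drop (l := ts) (i := i)
      rw [hd] at this
      simp at this
      omega
    · left
      have : i = ts.length := by omega
      subst this
      rw [List.take_length]

theorem pvOfList_eq_empty (l : List Char) : (String.ofList l = "") ↔ l = [] := by
  rw [show ("" : String) = String.ofList [] from rfl, String.ofList_inj]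

theorem pvNe_of_pvJ_ne {l : List (List Char)} (h : pvJ l ≠ []) : l ≠ [] := by
  rintro rfl; exact h rfl

-- candidate ' '.join(tokens[:x]) as a list-level value
theorem pvCand_eq (Wc : List (List Char)) (x : Int) (hx : 0 ≤ x) :
    PySem.Str.join " " (PySem.List.slice (List.map String.ofList Wc) none (some x))
      = String.ofList (pvJ (Wc.take x.toNat)) := by
  rw [PySem.List.slice_to _ hx, ← List.map_take]
  simp only [PySem.Str.join, List.map_map, Function.comp_def, String.toList_ofList, List.map_id']
  rw [show (" " : String).toList = [' '] from rfl, pvJ_eq_join]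

-- ===== VERDICT (by name: the statement is the Claim_ definition above) =====
theorem command_matches_allowlist_py_spec : Claim_equal_command_matches_allowlist_py := by
  intro command prefixes _
  unfold Spec_command_matches_allowlist_py
  rw [Bool.eq_iff_iff]
  have hcmd : (if command = "" then "" else command) = command := by
    by_cases h : command = "" <;> simp [h]
  have hBtok : PySem.Str.split₀ (PySem.Str.lower command) =
      List.map String.ofList (pvWords (PySem.Chars.lower command.toList) []) := by
    simp only [PySem.Str.split₀, PySem.Str.lower, String.toList_ofList, pvSplit₀_eq_words]
  simp only [command_matches_allowlist_py, command_matches_allowlist_py_alt,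
    beq_iff_eq, hcmd, pvNormA_eq, pvNormB_eq, pvOfList_eq_empty, hBtok,
    PySem.Str.startswith, String.toList_append, String.toList_ofList, PySem.List.len_eq,
    List.length_map]
  set Wc := pvWords (PySem.Chars.lower command.toList) [] with hWc
  have hWcGood : pvGood Wc := pvWords_good _ [] (by simp)
  by_cases hne : pvJ Wc = []
  · have hWcnil : Wc = [] := (pvJ_eq_nil Wc hWcGood).mp hne
    rw [if_pos hne]
    constructor
    · intro h; simp at h
    · intro h
      rw [List.any_eq_true] at h
      obtain ⟨x, hx, -⟩ := h
      exfalso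
      rw [hWcnil] at hx
      simp only [List.length_nil, Nat.cast_zero, zero_add] at hx
      rw [PySem.List.mem_pyRange_one] at hx
      omega
  · rw [if_neg hne, List.any_eq_true, List.any_eq_true]
    constructor
    · rintro ⟨p, hp, hcond⟩
      by_cases hWpnil : pvJ (pvWords (PySem.Chars.lower p.toList) []) = []
      · rw [if_pos hWpnil] at hcond; exact absurd hcond (by simp)
      · rw [if_neg hWpnil] at hcond
        have hWpGood : pvGood (pvWords (PySem.Chars.lower p.toList) []) :=
          pvWords_good _ [] (by simp)
        have hWpne := pvNe_of_pvJ_ne hWpnil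
        rw [Bool.or_eq_true, beq_iff_eq, String.ofList_inj] at hcond
        replace hcond : pvJ Wc = pvJ (pvWords (PySem.Chars.lower p.toList) []) ∨
            (pvJ (pvWords (PySem.Chars.lower p.toList) []) ++ [' ']) <+: pvJ Wc := by
          rcases hcond with h | h
          · exact Or.inl h
          · refine Or.inr ?_
            simpa [PySem.Chars.startswith, List.isPrefixOf_iff_prefix,
              show (" " : String).toList = [' '] from rfl] using h
        obtain ⟨i, h1, h2, htake⟩ := (pvKey Wc _ hWcGood hWpGood hWpne).mp hcond
        refine ⟨(i : Int), ?_, ?_⟩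
        · rw [PySem.List.mem_pyRange_one]
          constructor
          · exact_mod_cast h1
          · omega
        · rw [PySem.Set.contains_iff, pvCand_eq Wc _ (by positivity)]
          refine (pvMem_allowed (fun q => pvJ (pvWords (PySem.Chars.lower q.toList) []))
            prefixes _).mpr ⟨p, hp, hWpnil, ?_⟩
          simp [htake]
    · rintro ⟨x, hx, hmem⟩
      rw [PySem.List.mem_pyRange_one] at hx
      rw [PySem.Set.contains_iff, pvCand_eq Wc x (by omega)] at hmem
      obtain ⟨p, hp, hWpnil, heq⟩ :=
        (pvMem_allowed (fun q => pvJ (pvWords (PySem.Chars.lower q.toList) []))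
          prefixes _).mp hmem
      have hWpGood : pvGood (pvWords (PySem.Chars.lower p.toList) []) :=
        pvWords_good _ [] (by simp)
      have hWpne := pvNe_of_pvJ_ne hWpnil
      rw [String.ofList_inj] at heq
      have htake : Wc.take x.toNat = pvWords (PySem.Chars.lower p.toList) [] :=
        pvJ_inj _ _ (pvGood_take Wc hWcGood x.toNat) hWpGood heq
      have hcond := (pvKey Wc _ hWcGood hWpGood hWpne).mpr
        ⟨x.toNat, by omega, by omega, htake⟩
      refine ⟨p, hp, ?_⟩
      rw [if_neg hWpnil]
      rcases hcond with h | h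
      · simp [h]
      · refine Bool.or_eq_true _ _ |>.mpr (Or.inr ?_)
        simp only [PySem.Chars.startswith]
        rw [List.isPrefixOf_iff_prefix]
        simpa [show (" " : String).toList = [' '] from rfl] using h
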